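-- pv_equiv track=rewrite | github.com/kalinaowo/yet-another-blue-archive-mod-manager | utils/CRC_tool.py | gf_mod
-- ===== SOURCE A (Python) =====
-- def gf_mod(dividend, divisor, n):
--     if divisor == 0:
--         return dividend
--     dividend_bits = dividend.bit_length()
--     divisor_bits = divisor.bit_length()
--     while dividend != 0 and dividend.bit_length() >= divisor_bits:
--         shift = dividend.bit_length() - divisor_bits
--         dividend ^= divisor << shift
--     mask = (1 << n) - 1 if n < 64 else 0xFFFFFFFFFFFFFFFF
--     return dividend & mask
-- ===== SOURCE B (Python) =====
-- def _sweep(dividend, divisor, divisor_bits, i):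
--     if i < divisor_bits - 1:
--         return dividend
--     if (dividend >> i) & 1:
--         dividend ^= divisor << (i - (divisor_bits - 1))
--     return _sweep(dividend, divisor, divisor_bits, i - 1)
--
-- def gf_mod(dividend, divisor, n):
--     if divisor == 0:
--         return dividend
--     divisor_bits = divisor.bit_length()
--     dividend = _sweep(dividend, divisor, divisor_bits, dividend.bit_length() - 1)
--     mask = (1 << n) - 1 if n < 64 else 0xFFFFFFFFFFFFFFFF
--     return dividend & mask
-- ===== Notes on version B (the rewrite author's own statement) =====
-- stated objective: alternative
-- what changed: B replaces A's while-loop that recomputes dividend.bit_length() each iteration and jumps to the current top bit with a recursive fixed positional sweep over bit indices from dividend_bits-1 down to divisor_bits-1, testing each bit and XOR-ing the aligned divisor when set.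
-- outside the precondition, e.g. on gf_mod(5, -3, 8): A returns 255, B returns 2
import Mathlib
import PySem

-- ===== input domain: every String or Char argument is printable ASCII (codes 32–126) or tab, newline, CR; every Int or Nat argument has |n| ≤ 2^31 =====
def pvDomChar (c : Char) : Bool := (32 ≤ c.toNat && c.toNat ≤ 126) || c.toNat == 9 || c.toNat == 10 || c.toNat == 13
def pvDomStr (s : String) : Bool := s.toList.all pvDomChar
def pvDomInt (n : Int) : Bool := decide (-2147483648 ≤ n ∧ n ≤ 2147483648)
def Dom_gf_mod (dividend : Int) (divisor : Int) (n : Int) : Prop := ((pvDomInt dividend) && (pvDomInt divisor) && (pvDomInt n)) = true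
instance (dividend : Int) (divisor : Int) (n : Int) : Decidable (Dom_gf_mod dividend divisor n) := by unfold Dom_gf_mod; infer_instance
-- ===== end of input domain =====

-- B replaces A's while-loop (which recomputes bit_length and jumps to the current top bit each
-- iteration) by a recursive fixed positional sweep over the bit indices from dividend_bits-1
-- down to divisor_bits-1; objective: alternative decomposition, same cost.


-- ===== PORT A =====
-- A's while-loop; fuel = enough iterations (on Pre_ inputs each step strictly lowers bit_length,
-- so bitLength dividend iterations always suffice).
def gfLoopA (divisor : Int) (divisor_bits : Nat) : Nat → Int → Int
  | 0, dividend => dividend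
  | fuel+1, dividend =>
    if dividend ≠ 0 ∧ divisor_bits ≤ PySem.Int.bitLength dividend then
      gfLoopA divisor divisor_bits fuel
        (PySem.Int.bxor dividend (divisor <<< (PySem.Int.bitLength dividend - divisor_bits)))
    else dividend

def gf_mod (dividend : Int) (divisor : Int) (n : Int) : Int :=
  if divisor = 0 then dividend
  else
    let divisor_bits := PySem.Int.bitLength divisor
    let d := gfLoopA divisor divisor_bits (PySem.Int.bitLength dividend + 64) dividend
    let mask : Int := if n < 64 then (1 <<< n.toNat) - 1 else 0xFFFFFFFFFFFFFFFF
    PySem.Int.band d mask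

-- ===== PORT B =====
-- _sweep of Source B: fixed positional descent over bit indices.
def gfSweep (divisor : Int) (divisor_bits : Nat) (dividend : Int) (i : Int) : Int :=
  if i < (divisor_bits : Int) - 1 then dividend
  else
    let d := if PySem.Int.band (dividend >>> i.toNat) 1 = 1 then
               PySem.Int.bxor dividend (divisor <<< (i - ((divisor_bits : Int) - 1)).toNat)
             else dividend
    gfSweep divisor divisor_bits d (i - 1)
termination_by (i + 2).toNat
decreasing_by omega

def gf_mod_alt (dividend : Int) (divisor : Int) (n : Int) : Int :=
  if divisor = 0 then dividend
  else
    let divisor_bits := PySem.Int.bitLength divisor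
    let d := gfSweep divisor divisor_bits dividend ((PySem.Int.bitLength dividend : Int) - 1)
    let mask : Int := if n < 64 then (1 <<< n.toNat) - 1 else 0xFFFFFFFFFFFFFFFF
    PySem.Int.band d mask

-- ===== PRECONDITION & SPEC =====
-- Pre_ excludes (a) negative n with divisor ≠ 0, where A raises ValueError on 1 << n, and
-- (b) inputs whose reduction loop actually runs with a negative operand (negative divisor, or
-- negative dividend with divisor ≠ 0): there A may loop forever (e.g. (-5, 3, 8) or (1000, -6, 8))
-- or return an accidental value of Python's infinite two's-complement arithmetic, a corner no
-- GF(2) specification covers. Inputs where the loop never runs (bitLength dividend < bitLength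
-- divisor, any signs) are kept.
def Pre_gf_mod (dividend : Int) (divisor : Int) (n : Int) : Prop :=
  divisor = 0 ∨ (0 ≤ n ∧ (PySem.Int.bitLength dividend < PySem.Int.bitLength divisor ∨
    (0 ≤ dividend ∧ 0 < divisor)))
instance (dividend : Int) (divisor : Int) (n : Int) : Decidable (Pre_gf_mod dividend divisor n) := by unfold Pre_gf_mod; infer_instance
def pvWitness_gf_mod : Int × Int × Int := (5, 3, 8)

def Spec_gf_mod (dividend : Int) (divisor : Int) (n : Int) (out : Int) : Prop := out = gf_mod_alt dividend divisor n
instance (dividend : Int) (divisor : Int) (n : Int) (out : Int) : Decidable (Spec_gf_mod dividend divisor n out) := by unfold Spec_gf_mod; infer_instance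

-- ===== CLAIM (what is proved, stated in full; the proofs are below) =====
def Claim_equal_gf_mod : Prop := ∀ (dividend : Int) (divisor : Int) (n : Int), Dom_gf_mod dividend divisor n → Pre_gf_mod dividend divisor n → Spec_gf_mod dividend divisor n (gf_mod dividend divisor n)

-- ===== LEMMAS AND PROOFS =====

-- bitLength v = 0 only for v = 0
lemma bitLength_pos_of_ne {v : Int} (hv : v ≠ 0) : 1 ≤ PySem.Int.bitLength v := by
  by_contra h
  have hlt := PySem.Int.lt_two_pow_bitLength v
  have hb : PySem.Int.bitLength v = 0 := by omega
  rw [hb, pow_zero] at hlt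
  have : v.natAbs = 0 := by omega
  exact hv (Int.natAbs_eq_zero.mp this)

-- natAbs bound gives a bitLength bound
lemma bitLength_le_of_lt {d : Int} {k : Nat} (h : d.natAbs < 2 ^ k) :
    PySem.Int.bitLength d ≤ k := by
  by_contra hgt
  by_cases hd : d = 0
  · subst hd; simp [PySem.Int.bitLength_zero] at hgt
  · have h1 := PySem.Int.two_pow_bitLength_le d hd
    have h2 : (2:Nat) ^ k ≤ 2 ^ (PySem.Int.bitLength d - 1) :=
      Nat.pow_le_pow_right (by norm_num) (by omega)
    omega

lemma bitLength_eq {d : Int} {i : Nat} (h1 : 2 ^ i ≤ d.natAbs) (h2 : d.natAbs < 2 ^ (i+1)) :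
    PySem.Int.bitLength d = i + 1 := by
  have hle : PySem.Int.bitLength d ≤ i + 1 := bitLength_le_of_lt h2
  have hne : d ≠ 0 := by
    intro h; subst h; simp at h1
  have hlt := PySem.Int.lt_two_pow_bitLength d
  by_contra hne'
  have : PySem.Int.bitLength d ≤ i := by omega
  have : (2:Nat) ^ PySem.Int.bitLength d ≤ 2 ^ i := Nat.pow_le_pow_right (by norm_num) this
  omega

-- xor of two numbers with the same top bit drops below that bit
lemma xor_lt_of_top {a b : Nat} {i : Nat} (ha1 : 2 ^ i ≤ a) (ha2 : a < 2 ^ (i+1))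
    (hb1 : 2 ^ i ≤ b) (hb2 : b < 2 ^ (i+1)) : a ^^^ b < 2 ^ i := by
  have h : ∀ j, i ≤ j → (a ^^^ b).testBit j = false := by
    intro j hj
    rcases Nat.eq_or_lt_of_le hj with heq | hj'
    · subst heq
      have ta : a.testBit i = true := by
        have hd : a / 2 ^ i = 1 := Nat.div_eq_of_lt_le (by omega) (by omega)
        simp [Nat.testBit, Nat.shiftRight_eq_div_pow, hd]
      have tb : b.testBit i = true := by
        have hd : b / 2 ^ i = 1 := Nat.div_eq_of_lt_le (by omega) (by omega)
        simp [Nat.testBit, Nat.shiftRight_eq_div_pow, hd]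
      simp [Nat.testBit_xor, ta, tb]
    · have ta : a.testBit j = false :=
        Nat.testBit_lt_two_pow (lt_of_lt_of_le ha2 (Nat.pow_le_pow_right (by norm_num) hj'))
      have tb : b.testBit j = false :=
        Nat.testBit_lt_two_pow (lt_of_lt_of_le hb2 (Nat.pow_le_pow_right (by norm_num) hj'))
      simp [Nat.testBit_xor, ta, tb]
  exact Nat.lt_pow_two_of_testBit _ h

-- A's loop is the identity when it never fires
lemma gfLoopA_noop {divisor : Int} {vb : Nat} (fuel : Nat) (d : Int)
    (h : d = 0 ∨ PySem.Int.bitLength d < vb) : gfLoopA divisor vb fuel d = d := by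
  cases fuel with
  | zero => rfl
  | succ f =>
    simp only [gfLoopA]
    rcases h with rfl | h
    · simp
    · rw [if_neg]; rintro ⟨-, h'⟩; omega

-- main equivalence: the positional sweep computes exactly what A's top-bit loop computes
lemma sweep_eq_loop (v : Int) (hv : 0 < v) :
    ∀ (N : Nat) (j : Int) (d : Int) (fuel : Nat), (j + 2).toNat ≤ N → 0 ≤ d →
      d.natAbs < 2 ^ ((j + 1).toNat) → PySem.Int.bitLength d ≤ fuel →
      gfSweep v (PySem.Int.bitLength v) d j = gfLoopA v (PySem.Int.bitLength v) fuel d := by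
  have hvb : 1 ≤ PySem.Int.bitLength v := bitLength_pos_of_ne hv.ne'
  obtain ⟨V, rfl⟩ := Int.eq_ofNat_of_zero_le hv.le
  have hVlt : V < 2 ^ PySem.Int.bitLength (V : Int) := by
    simpa using PySem.Int.lt_two_pow_bitLength (V : Int)
  have hVge : 2 ^ (PySem.Int.bitLength (V : Int) - 1) ≤ V := by
    simpa using PySem.Int.two_pow_bitLength_le (V : Int) hv.ne'
  intro N
  induction N with
  | zero =>
    intro j d fuel hN hd hlt hfuel
    have hd0 : d = 0 := by
      have : (j + 1).toNat = 0 := by omega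
      rw [this, pow_zero] at hlt
      omega
    rw [gfSweep, if_pos (by omega)]
    exact (gfLoopA_noop fuel d (Or.inl hd0)).symm
  | succ N ih =>
    intro j d fuel hN hd hlt hfuel
    by_cases hguard : j < (PySem.Int.bitLength (V : Int) : Int) - 1
    · rw [gfSweep, if_pos hguard]
      refine (gfLoopA_noop fuel d ?_).symm
      by_cases hd0 : d = 0
      · exact Or.inl hd0
      · exact Or.inr (lt_of_le_of_lt (bitLength_le_of_lt hlt)
          (by omega : (j + 1).toNat < PySem.Int.bitLength (V : Int)))
    · have hj0 : 0 ≤ j := by omega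
      obtain ⟨D, rfl⟩ := Int.eq_ofNat_of_zero_le hd
      have hcastR : ((D : Int) >>> j.toNat) = ((D >>> j.toNat : Nat) : Int) := by
        exact_mod_cast rfl
      have hDlt : D < 2 ^ (j.toNat + 1) := by
        have he : (j + 1).toNat = j.toNat + 1 := by omega
        rw [he] at hlt
        simpa using hlt
      by_cases hbit : 2 ^ j.toNat ≤ D
      · -- bit j is set: both sides perform the same aligned XOR step
        have hD1 : D >>> j.toNat = 1 := by
          rw [Nat.shiftRight_eq_div_pow]
          exact Nat.div_eq_of_lt_le (by omega) (by omega)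
        have hband : PySem.Int.band ((D : Int) >>> j.toNat) 1 = 1 := by
          rw [hcastR, hD1]
          decide
        have hbl : PySem.Int.bitLength (D : Int) = j.toNat + 1 :=
          bitLength_eq (by simpa using hbit) (by simpa using hDlt)
        have hDne : (D : Int) ≠ 0 := by
          have : 0 < D := lt_of_lt_of_le (Nat.pos_of_ne_zero (by positivity)) hbit
          exact_mod_cast this.ne'
        obtain ⟨f, rfl⟩ : ∃ f, fuel = f + 1 := by
          rcases fuel with _ | f
          · exfalso; rw [hbl] at hfuel; omega
          · exact ⟨f, rfl⟩
        have hs : (j - ((PySem.Int.bitLength (V : Int) : Int) - 1)).toNat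
            = PySem.Int.bitLength (D : Int) - PySem.Int.bitLength (V : Int) := by
          rw [hbl]; omega
        have hcastL : ∀ k : Nat, ((V : Int) <<< k) = ((V <<< k : Nat) : Int) := by
          intro k; exact_mod_cast rfl
        have hnext : ∀ k : Nat, PySem.Int.bxor (D : Int) ((V : Int) <<< k)
            = ((D ^^^ (V <<< k) : Nat) : Int) := by
          intro k
          rw [hcastL k]
          simpa using PySem.Int.bxor_natCast D (V <<< k)
        set s := PySem.Int.bitLength (D : Int) - PySem.Int.bitLength (V : Int) with hsdef
        have hsum1 : PySem.Int.bitLength (V : Int) - 1 + s = j.toNat := by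
          rw [hsdef, hbl]; omega
        have hsum2 : PySem.Int.bitLength (V : Int) + s = j.toNat + 1 := by
          rw [hsdef, hbl]; omega
        have hlo : 2 ^ j.toNat ≤ V <<< s := by
          rw [Nat.shiftLeft_eq, ← hsum1, pow_add]
          exact Nat.mul_le_mul_right _ hVge
        have hhi : V <<< s < 2 ^ (j.toNat + 1) := by
          rw [Nat.shiftLeft_eq, ← hsum2, pow_add]
          exact (Nat.mul_lt_mul_right (by positivity)).mpr hVlt
        have hE : D ^^^ (V <<< s) < 2 ^ j.toNat := xor_lt_of_top hbit hDlt hlo hhi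
        rw [gfSweep, if_neg hguard]
        simp only [hband, hs, hnext, if_true]
        rw [gfLoopA, if_pos (show (D : Int) ≠ 0 ∧
            PySem.Int.bitLength (V : Int) ≤ PySem.Int.bitLength (D : Int) from
            ⟨hDne, by rw [hbl]; omega⟩), ← hsdef, hnext]
        refine ih (j - 1) _ f (by omega) (by positivity) ?_ ?_
        · have he : (j - 1 + 1).toNat = j.toNat := by omega
          rw [he]; simpa using hE
        · have : PySem.Int.bitLength ((D ^^^ (V <<< s) : Nat) : Int) ≤ j.toNat :=
            bitLength_le_of_lt (by simpa using hE)
          rw [hbl] at hfuel; omega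
      · -- bit j is clear: the sweep skips, A's loop state is unchanged
        have hD0 : D >>> j.toNat = 0 := by
          rw [Nat.shiftRight_eq_div_pow]
          exact Nat.div_eq_of_lt (by omega)
        have hband : PySem.Int.band ((D : Int) >>> j.toNat) 1 = 0 := by
          rw [hcastR, hD0]
          decide
        rw [gfSweep, if_neg hguard]
        simp only [hband]
        rw [if_neg (by norm_num)]
        refine ih (j - 1) _ fuel (by omega) hd ?_ hfuel
        have he : (j - 1 + 1).toNat = j.toNat := by omega
        rw [he]; simpa using hbit

-- ===== VERDICT (by name: the statement is the Claim_ definition above) =====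
theorem gf_mod_spec : Claim_equal_gf_mod := by
  intro dividend divisor n _ hpre
  unfold Spec_gf_mod gf_mod gf_mod_alt
  by_cases hz : divisor = 0
  · simp [hz]
  rw [if_neg hz, if_neg hz]
  rcases hpre with rfl | ⟨-, hcase⟩
  · exact absurd rfl hz
  have hvb : 1 ≤ PySem.Int.bitLength divisor := bitLength_pos_of_ne hz
  have hmain : gfLoopA divisor (PySem.Int.bitLength divisor) (PySem.Int.bitLength dividend + 64) dividend
      = gfSweep divisor (PySem.Int.bitLength divisor) dividend ((PySem.Int.bitLength dividend : Int) - 1) := by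
    rcases hcase with hlt | ⟨hd, hvpos⟩
    · rw [gfLoopA_noop _ _ (Or.inr hlt), gfSweep, if_pos (by omega)]
    · refine (sweep_eq_loop divisor hvpos ((((PySem.Int.bitLength dividend : Int) - 1) + 2).toNat)
        _ _ _ le_rfl hd ?_ (by omega)).symm
      have hlt2 := PySem.Int.lt_two_pow_bitLength dividend
      have he : (((PySem.Int.bitLength dividend : Int) - 1) + 1).toNat = PySem.Int.bitLength dividend := by omega
      rw [he]; exact hlt2
  simp only [hmain]
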